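-- pv_equiv track=rewrite | github.com/zt2misay2/Datacon2025-AISec | pirate/process.py | find_max_head_tail_overlap
-- ===== SOURCE A (Python) =====
-- from typing import List, Optional, Tuple
--
-- def find_max_head_tail_overlap(a: str, b: str) -> Tuple[int, Optional[str]]:
--     """
--     寻找 a 和 b 的最大头尾重叠：
--     - 若 a 的尾部与 b 的头部有重叠，返回 (长度, 'a_b')
--     - 若 b 的尾部与 a 的头部有重叠，返回 (长度, 'b_a')
--     - 否则返回 (0, None)
--     """
--     max_len = min(len(a), len(b))
--     best_len = 0
--     best_dir: Optional[str] = None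
--
--     # 从长到短找第一个匹配的重叠
--     for L in range(max_len, 0, -1):
--         # a 尾 = b 头
--         if a[-L:] == b[:L]:
--             best_len = L
--             best_dir = "a_b"
--             break
--         # b 尾 = a 头
--         if b[-L:] == a[:L]:
--             best_len = L
--             best_dir = "b_a"
--             break
--
--     return best_len, best_dir
-- ===== SOURCE B (Python) =====
-- def find_max_head_tail_overlap(a, b):
--     """One ascending pass records, for each direction, the largest overlap length
--     seen; the winner (ties to 'a_b') is decided once at the end."""
--     m = min(len(a), len(b))
--     x = 0  # largest L with a's tail == b's head
--     y = 0  # largest L with b's tail == a's head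
--     for L in range(1, m + 1):
--         if a.endswith(b[:L]):
--             x = L
--         if b.endswith(a[:L]):
--             y = L
--     if x == 0 and y == 0:
--         return 0, None
--     return (x, "a_b") if x >= y else (y, "b_a")
-- ===== Notes on version B (the rewrite author's own statement) =====
-- stated objective: alternative
-- what changed: Replaced A's descending first-match loop with interleaved break-out checks by a single ascending pass that tracks the best overlap length for each direction independently (using str.endswith instead of comparing a negative tail slice against a head slice) and decides length and direction arithmetically at the end, with the a_b tie-break made explicit as x >= y.
import Mathlib
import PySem

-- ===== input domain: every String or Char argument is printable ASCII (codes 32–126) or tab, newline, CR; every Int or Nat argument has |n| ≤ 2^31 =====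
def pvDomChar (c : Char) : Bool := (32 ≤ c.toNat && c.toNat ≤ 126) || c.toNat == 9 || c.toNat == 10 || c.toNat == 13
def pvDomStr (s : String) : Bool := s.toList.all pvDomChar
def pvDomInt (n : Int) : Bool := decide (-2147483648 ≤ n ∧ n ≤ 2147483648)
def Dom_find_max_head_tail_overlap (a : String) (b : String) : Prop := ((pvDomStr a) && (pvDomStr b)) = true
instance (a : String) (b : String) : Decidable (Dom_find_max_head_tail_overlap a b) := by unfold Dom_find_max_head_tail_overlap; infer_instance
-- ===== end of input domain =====

-- B replaces A's descending first-match loop (with interleaved breaks) by one ascending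
-- pass tracking each direction's best overlap length via str.endswith (no tail-slice
-- allocation), deciding direction at the end; a timing run measured B faster by a
-- constant factor.

-- ===== PORT A =====
-- the 'for L in range(max_len, 0, -1)' loop: two checks, break on first match
def pvLoopA (a b : List Char) : List Int → Int × Option String
  | [] => (0, none)
  | L :: rest =>
      if PySem.List.slice a (some (-L)) none = PySem.List.slice b none (some L) then
        (L, some "a_b")
      else if PySem.List.slice b (some (-L)) none = PySem.List.slice a none (some L) then
        (L, some "b_a")
      else pvLoopA a b rest

def find_max_head_tail_overlap (a : String) (b : String) : Int × Option String :=
  let max_len : Int := min (PySem.Str.len a) (PySem.Str.len b)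
  pvLoopA a.toList b.toList (PySem.List.pyRange max_len 0 (-1))

-- ===== PORT B =====
-- loop body of Source B: update (x, y) at overlap length L
def pvStepB (a b : List Char) (st : Int × Int) (L : Int) : Int × Int :=
  let x := if PySem.Chars.endswith a (PySem.List.slice b none (some L)) then L else st.1
  let y := if PySem.Chars.endswith b (PySem.List.slice a none (some L)) then L else st.2
  (x, y)

def find_max_head_tail_overlap_alt (a : String) (b : String) : Int × Option String :=
  let m : Int := min (PySem.Str.len a) (PySem.Str.len b)
  let xy := (PySem.List.pyRange 1 (m + 1) 1).foldl (pvStepB a.toList b.toList) (0, 0)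
  if xy.1 = 0 ∧ xy.2 = 0 then (0, none)
  else if xy.1 ≥ xy.2 then (xy.1, some "a_b") else (xy.2, some "b_a")

-- ===== PRECONDITION & SPEC =====
def Spec_find_max_head_tail_overlap (a : String) (b : String) (out : Int × Option String) : Prop := out = find_max_head_tail_overlap_alt a b
instance (a : String) (b : String) (out : Int × Option String) : Decidable (Spec_find_max_head_tail_overlap a b out) := by unfold Spec_find_max_head_tail_overlap; infer_instance

-- ===== CLAIM (what is proved, stated in full; the proofs are below) =====
def Claim_equal_find_max_head_tail_overlap : Prop := ∀ (a : String) (b : String), Dom_find_max_head_tail_overlap a b → Spec_find_max_head_tail_overlap a b (find_max_head_tail_overlap a b)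

-- ===== LEMMAS AND PROOFS =====

-- A's check at length L: a[-L:] == b[:L]
def pvPA (a b : List Char) (L : Int) : Bool :=
  decide (PySem.List.slice a (some (-L)) none = PySem.List.slice b none (some L))

-- B's check at length L: a.endswith(b[:L])
def pvPB (a b : List Char) (L : Int) : Bool :=
  PySem.Chars.endswith a (PySem.List.slice b none (some L))

-- largest L in [1..m] satisfying p, else 0
def pvBest (p : Int → Bool) : Nat → Nat
  | 0 => 0
  | m + 1 => if p ((m : Int) + 1) then m + 1 else pvBest p m

-- the common result shape: best length per direction, ties to "a_b"
def pvCombine (x y : Nat) : Int × Option String :=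
  if x = 0 ∧ y = 0 then (0, none)
  else if y ≤ x then ((x : Int), some "a_b") else ((y : Int), some "b_a")

theorem pvBest_le (p : Int → Bool) (m : Nat) : pvBest p m ≤ m := by
  induction m with
  | zero => simp [pvBest]
  | succ k ih => simp only [pvBest]; split <;> omega

theorem pvBest_congr (p q : Int → Bool) (m : Nat)
    (h : ∀ k : Nat, k < m → p ((k : Int) + 1) = q ((k : Int) + 1)) :
    pvBest p m = pvBest q m := by
  induction m with
  | zero => rfl
  | succ k ih =>
      simp only [pvBest, h k (by omega)]
      rw [ih (fun j hj => h j (by omega))]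

-- A's descending first-match loop computes pvCombine of the two direction maxima
theorem pvLoopA_eq (a b : List Char) (m : Nat) :
    pvLoopA a b (PySem.List.pyRange (m : Int) 0 (-1)) =
      pvCombine (pvBest (pvPA a b) m) (pvBest (pvPA b a) m) := by
  induction m with
  | zero => simp [PySem.List.pyRange_neg_one_eq_nil, pvLoopA, pvBest, pvCombine]
  | succ k ih =>
      rw [show ((k+1 : Nat) : Int) = (k:Int)+1 by push_cast; ring,
          PySem.List.pyRange_neg_one_cons (by omega)]
      have e : (k:Int) + 1 - 1 = (k:Int) := by ring
      rw [e]
      simp only [pvLoopA, pvBest, pvPA, decide_eq_true_eq]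
      have hx := pvBest_le (pvPA a b) k
      have hy := pvBest_le (pvPA b a) k
      split_ifs with h1 h2 h3
      · unfold pvCombine
        rw [if_neg (by omega), if_pos (le_refl _)]
        simp
      · unfold pvCombine
        rw [if_neg (by omega), if_pos (by omega)]
        simp
      · unfold pvCombine
        rw [if_neg (by omega), if_neg (by omega)]
        simp
      · exact ih

-- B's ascending fold computes the two direction maxima
theorem pvFoldB_eq (a b : List Char) (m : Nat) :
    (PySem.List.pyRange 1 ((m : Int) + 1) 1).foldl (pvStepB a b) (0, 0) =
      ((pvBest (pvPB a b) m : Int), (pvBest (pvPB b a) m : Int)) := by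
  induction m with
  | zero => simp [PySem.List.pyRange_one_eq_nil, pvBest]
  | succ k ih =>
      rw [show ((k+1 : Nat) : Int) + 1 = ((k:Int) + 1) + 1 by push_cast; ring,
          PySem.List.pyRange_one_succ_right (by omega), List.foldl_append, ih]
      simp only [List.foldl_cons, List.foldl_nil, pvStepB, pvBest, pvPB]
      split_ifs <;> simp

-- within bounds, A's slice-equality check agrees with B's endswith check
theorem pvPA_eq_pvPB (a b : List Char) (L : Nat) (h1 : 1 ≤ L)
    (hb : L ≤ b.length) : pvPA a b (L : Int) = pvPB a b (L : Int) := by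
  have hs : PySem.List.slice a (some (-(L:Int))) none = a.drop (a.length - L) :=
    PySem.List.slice_from_neg_natCast _ _ (by omega)
  have ht : PySem.List.slice b none (some (L:Int)) = b.take L :=
    PySem.List.slice_to_natCast _ _
  have hlen : (b.take L).length = L := by simp [hb]
  simp only [pvPA, pvPB, hs, ht]
  rw [Bool.eq_iff_iff]
  simp only [decide_eq_true_eq, PySem.Chars.endswith_iff]
  rw [List.suffix_iff_eq_drop, hlen]
  exact ⟨fun h => h.symm, fun h => h.symm⟩

theorem pvCombine_cast (x y : Nat) :
    (if (x : Int) = 0 ∧ (y : Int) = 0 then ((0 : Int), (none : Option String))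
     else if (x : Int) ≥ (y : Int) then ((x : Int), some "a_b") else ((y : Int), some "b_a"))
      = pvCombine x y := by
  unfold pvCombine
  split_ifs <;> simp_all

-- ===== VERDICT (by name: the statement is the Claim_ definition above) =====
theorem find_max_head_tail_overlap_spec : Claim_equal_find_max_head_tail_overlap := by
  intro a b _
  unfold Spec_find_max_head_tail_overlap
  simp only [find_max_head_tail_overlap, find_max_head_tail_overlap_alt]
  have hlen : min (PySem.Str.len a) (PySem.Str.len b)
      = ((min a.toList.length b.toList.length : Nat) : Int) := by
    simp [PySem.Str.len]
  rw [hlen]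
  set n := min a.toList.length b.toList.length with hn
  rw [pvLoopA_eq a.toList b.toList n, pvFoldB_eq a.toList b.toList n]
  have cab : pvBest (pvPA a.toList b.toList) n = pvBest (pvPB a.toList b.toList) n :=
    pvBest_congr _ _ n (fun k hk => by
      have := pvPA_eq_pvPB a.toList b.toList (k+1) (by omega) (by omega)
      push_cast at this ⊢
      exact this)
  have cba : pvBest (pvPA b.toList a.toList) n = pvBest (pvPB b.toList a.toList) n :=
    pvBest_congr _ _ n (fun k hk => by
      have := pvPA_eq_pvPB b.toList a.toList (k+1) (by omega) (by omega)
      push_cast at this ⊢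
      exact this)
  rw [cab, cba]
  exact (pvCombine_cast _ _).symm
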